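-- pv_equiv track=rewrite | github.com/gahjelle/everybody_codes | python/src/2025_the-song-of-ducks-and-dragons/10_feast-on-the-board/ec202510.py | part2
-- ===== SOURCE A (Python) =====
-- import itertools
-- from typing import TypeAlias
--
-- Square: TypeAlias = tuple[int, int]
--
-- MOVES = [(-2, -1), (-2, 1), (-1, -2), (-1, 2), (1, -2), (1, 2), (2, -1), (2, 1)]
--
-- def parse_board(
--     puzzle_input: str,
-- ) -> tuple[set[Square], Square, set[Square], set[Square]]:
--     """Parse the game board. Find the dragon, all sheep, and all hideouts"""
--     board = {
--         (row, col): char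
--         for row, line in enumerate(puzzle_input.splitlines())
--         for col, char in enumerate(line)
--     }
--     dragon = next(pos for pos, char in board.items() if char == "D")
--     sheep = {pos for pos, char in board.items() if char == "S"}
--     hideouts = {pos for pos, char in board.items() if char == "#"}
--     return set(board), dragon, sheep, hideouts
--
-- def part2(puzzle_input: str, num_rounds=20) -> int:
--     """Solve part 2."""
--     board, dragon, sheep, hideouts = parse_board(puzzle_input)
--     dragons = {dragon}
--
--     num_eaten = 0
--     for _ in range(num_rounds):
--         # Dragon move
--         dragons = move_dragons(dragons, board)
--         num_eaten += len(dragons & (sheep - hideouts))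
--         sheep -= dragons - hideouts
--
--         # Sheep move
--         sheep = move_sheep(sheep, board)
--         num_eaten += len(dragons & (sheep - hideouts))
--         sheep -= dragons - hideouts
--     return num_eaten
--
-- def move_dragons(dragons: set[Square], board: set[Square]) -> set[Square]:
--     """Move a set of dragons to all their possible new positions on the board."""
--     return {
--         (dr + mr, dc + mc) for (dr, dc), (mr, mc) in itertools.product(dragons, MOVES)
--     } & board
--
-- def move_sheep(sheep: set[Square], board: set[Square]) -> set[Square]:
--     """Move all sheep to their new positions on the board."""
--     return {(r + 1, c) for r, c in sheep} & board
-- ===== SOURCE B (Python) =====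
-- MOVES = [(-2, -1), (-2, 1), (-1, -2), (-1, 2), (1, -2), (1, 2), (2, -1), (2, 1)]
--
-- def part2(puzzle_input, num_rounds=20):
--     """Solve part 2: precompute the dragon set per round, then trace each sheep independently."""
--     cells = [
--         ((row, col), char)
--         for row, line in enumerate(puzzle_input.splitlines())
--         for col, char in enumerate(line)
--     ]
--     board = {pos for pos, _ in cells}
--     dragon = next(pos for pos, char in cells if char == "D")
--     hideouts = {pos for pos, char in cells if char == "#"}
--     sheep = [pos for pos, char in cells if char == "S"]
--
--     # Dragon motion never depends on the sheep: tabulate the dragon set after each move.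
--     table = []
--     dragons = {dragon}
--     for _ in range(num_rounds):
--         dragons = {
--             (r + dr, c + dc) for r, c in dragons for dr, dc in MOVES
--         } & board
--         table.append(dragons)
--
--     # Each sheep moves deterministically; count its first collision, if any.
--     num_eaten = 0
--     for pos in sheep:
--         for dragons in table:
--             if pos in dragons and pos not in hideouts:
--                 num_eaten += 1
--                 break
--             pos = (pos[0] + 1, pos[1])
--             if pos not in board:
--                 break
--             if pos in dragons and pos not in hideouts:
--                 num_eaten += 1
--                 break
--     return num_eaten
-- ===== Notes on version B (the rewrite author's own statement) =====
-- stated objective: alternative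
-- what changed: Instead of interleaving dragon and sheep set-difference bookkeeping per round, B precomputes the dragon set for every round once (dragon motion is sheep-independent) and then traces each sheep's deterministic downward trajectory independently, counting its first collision.
import Mathlib
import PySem

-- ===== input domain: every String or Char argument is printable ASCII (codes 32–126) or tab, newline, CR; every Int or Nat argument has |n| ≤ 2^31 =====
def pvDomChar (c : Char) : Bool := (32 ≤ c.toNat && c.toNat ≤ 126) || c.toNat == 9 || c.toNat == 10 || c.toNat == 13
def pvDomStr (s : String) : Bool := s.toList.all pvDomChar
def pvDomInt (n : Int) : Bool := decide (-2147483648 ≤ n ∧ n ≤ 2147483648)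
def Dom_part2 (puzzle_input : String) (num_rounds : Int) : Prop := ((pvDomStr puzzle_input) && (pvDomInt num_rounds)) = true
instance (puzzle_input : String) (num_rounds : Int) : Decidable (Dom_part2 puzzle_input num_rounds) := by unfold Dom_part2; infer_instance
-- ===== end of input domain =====

-- B replaces A's interleaved per-round sheep-set bookkeeping by a precomputed per-round dragon table
-- plus an independent trajectory scan per sheep (alternative decomposition, similar cost).

-- ===== PORT A =====
def pvMoves : List (Int × Int) := [(-2, -1), (-2, 1), (-1, -2), (-1, 2), (1, -2), (1, 2), (2, -1), (2, 1)]

-- the dict comprehension of parse_board, iterated flat (row-major); values are the chars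
def pvCellsA (puzzle_input : String) : List ((Int × Int) × Char) :=
  (PySem.List.enumerate (PySem.Str.splitlines puzzle_input)).flatMap
    (fun rl => (PySem.List.enumerate rl.2.toList).map (fun cc => ((rl.1, cc.1), cc.2)))

def pvMoveDragons (dragons board : PySem.Set (Int × Int)) : PySem.Set (Int × Int) :=
  PySem.Set.inter
    (PySem.Set.ofList (dragons.flatMap (fun d => pvMoves.map (fun m => (d.1 + m.1, d.2 + m.2)))))
    board

def pvMoveSheep (sheep board : PySem.Set (Int × Int)) : PySem.Set (Int × Int) :=
  PySem.Set.inter (PySem.Set.ofList (sheep.map (fun p => (p.1 + 1, p.2)))) board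

-- one round of A's loop on state (dragons, sheep, num_eaten)
def pvStepA (board hideouts : PySem.Set (Int × Int))
    (st : PySem.Set (Int × Int) × PySem.Set (Int × Int) × Int) :
    PySem.Set (Int × Int) × PySem.Set (Int × Int) × Int :=
  let dragons := pvMoveDragons st.1 board
  let eaten1 := st.2.2 + PySem.Set.len (PySem.Set.inter dragons (PySem.Set.diff st.2.1 hideouts))
  let sheep1 := PySem.Set.diff st.2.1 (PySem.Set.diff dragons hideouts)
  let sheep2 := pvMoveSheep sheep1 board
  let eaten2 := eaten1 + PySem.Set.len (PySem.Set.inter dragons (PySem.Set.diff sheep2 hideouts))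
  let sheep3 := PySem.Set.diff sheep2 (PySem.Set.diff dragons hideouts)
  (dragons, sheep3, eaten2)

def part2 (puzzle_input : String) (num_rounds : Int) : Int :=
  let d := (pvCellsA puzzle_input).foldl (fun d p => d.insert p.1 p.2) PySem.Dict.empty
  let board : PySem.Set (Int × Int) := PySem.Set.ofList d.keys
  -- next(...) raises StopIteration when no 'D' is present: excluded by Pre_part2
  let dragon := ((d.items.find? (fun p => p.2 == 'D')).getD ((0, 0), 'D')).1
  let sheep : PySem.Set (Int × Int) :=
    PySem.Set.ofList ((d.items.filter (fun p => p.2 == 'S')).map (·.1))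
  let hideouts : PySem.Set (Int × Int) :=
    PySem.Set.ofList ((d.items.filter (fun p => p.2 == '#')).map (·.1))
  let st := (PySem.List.pyRange 0 num_rounds 1).foldl
    (fun st _ => pvStepA board hideouts st)
    (PySem.Set.ofList [dragon], sheep, 0)
  st.2.2

-- ===== PORT B =====
-- Source B builds the same row-major cell list and MOVES table: pvCellsA / pvMoves are shared helpers

-- Source B's inner loop over the dragon table, with both break sites
def pvEat (board hideouts : PySem.Set (Int × Int)) :
    (Int × Int) → List (PySem.Set (Int × Int)) → Int
  | _, [] => 0
  | pos, dragons :: rest =>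
    if PySem.Set.contains dragons pos && !PySem.Set.contains hideouts pos then 1
    else
      let pos' := (pos.1 + 1, pos.2)
      if !PySem.Set.contains board pos' then 0
      else if PySem.Set.contains dragons pos' && !PySem.Set.contains hideouts pos' then 1
      else pvEat board hideouts pos' rest

def part2_alt (puzzle_input : String) (num_rounds : Int) : Int :=
  let cells := pvCellsA puzzle_input
  let board : PySem.Set (Int × Int) := PySem.Set.ofList (cells.map (·.1))
  let dragon := ((cells.find? (fun p => p.2 == 'D')).getD ((0, 0), 'D')).1
  let hideouts : PySem.Set (Int × Int) :=
    PySem.Set.ofList ((cells.filter (fun p => p.2 == '#')).map (·.1))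
  let sheep := (cells.filter (fun p => p.2 == 'S')).map (·.1)
  let tbl := ((PySem.List.pyRange 0 num_rounds 1).foldl
    (fun (st : PySem.Set (Int × Int) × List (PySem.Set (Int × Int))) _ =>
      let dragons := PySem.Set.inter
        (PySem.Set.ofList (st.1.flatMap (fun p => pvMoves.map (fun m => (p.1 + m.1, p.2 + m.2)))))
        board
      (dragons, st.2 ++ [dragons]))
    (PySem.Set.ofList [dragon], [])).2
  sheep.foldl (fun acc s => acc + pvEat board hideouts s tbl) 0

-- ===== PRECONDITION & SPEC =====
-- Pre_ excludes inputs with no 'D' on the board, on which A's next(...) raises StopIteration.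
def Pre_part2 (puzzle_input : String) (num_rounds : Int) : Prop :=
  ∃ line ∈ PySem.Str.splitlines puzzle_input, 'D' ∈ line.toList
instance (puzzle_input : String) (num_rounds : Int) : Decidable (Pre_part2 puzzle_input num_rounds) := by
  unfold Pre_part2; infer_instance

def pvWitness_part2 : String × Int := (".D.\nS..", 3)

def Spec_part2 (puzzle_input : String) (num_rounds : Int) (out : Int) : Prop := out = part2_alt puzzle_input num_rounds
instance (puzzle_input : String) (num_rounds : Int) (out : Int) : Decidable (Spec_part2 puzzle_input num_rounds out) := by unfold Spec_part2; infer_instance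

-- ===== CLAIM (what is proved, stated in full; the proofs are below) =====
def Claim_equal_part2 : Prop := ∀ (puzzle_input : String) (num_rounds : Int), Dom_part2 puzzle_input num_rounds → Pre_part2 puzzle_input num_rounds → Spec_part2 puzzle_input num_rounds (part2 puzzle_input num_rounds)


-- ===== LEMMAS AND PROOFS =====

-- generic helpers ---------------------------------------------------------

theorem pv_foldl_const {α β : Type} (f : α → α) (l : List β) (st : α) :
    l.foldl (fun s _ => f s) st = f^[l.length] st := by
  induction l generalizing st with
  | nil => rfl
  | cons x xs ih => simp [List.foldl_cons, ih, Function.iterate_succ_apply]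

theorem pv_contains_diff {α : Type} [BEq α] [LawfulBEq α] (a b : PySem.Set α) (x : α) :
    (PySem.Set.diff a b).contains x = (a.contains x && !b.contains x) := by
  simp only [PySem.Set.diff, PySem.Set.contains, List.contains_eq_mem]
  cases hx : decide (x ∈ a) <;> cases hb : decide (x ∈ b) <;>
    simp_all [List.mem_filter]

theorem pv_len_inter {α : Type} [BEq α] [LawfulBEq α] (a b : PySem.Set α)
    (ha : a.Nodup) (hb : b.Nodup) :
    PySem.Set.len (PySem.Set.inter a b) = ((b.filter (fun x => a.contains x)).length : Int) := by
  have h : (PySem.Set.inter a b).Perm (b.filter (fun x => a.contains x)) := by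
    rw [List.perm_ext_iff_of_nodup (PySem.Set.nodup_inter a b ha) (hb.filter _)]
    intro y
    simp only [PySem.Set.inter, List.mem_filter, PySem.Set.contains, List.contains_eq_mem,
      decide_eq_true_eq]
    tauto
  simp [PySem.Set.len, h.length_eq]

-- the dragon table ---------------------------------------------------------

def pvDown (p : Int × Int) : Int × Int := (p.1 + 1, p.2)

def pvTable (board : PySem.Set (Int × Int)) :
    PySem.Set (Int × Int) → Nat → List (PySem.Set (Int × Int))
  | _, 0 => []
  | ds, k + 1 => pvMoveDragons ds board :: pvTable board (pvMoveDragons ds board) k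

theorem pv_tableB {β : Type} (board : PySem.Set (Int × Int)) (l : List β)
    (ds : PySem.Set (Int × Int)) (acc : List (PySem.Set (Int × Int))) :
    l.foldl (fun (st : PySem.Set (Int × Int) × List (PySem.Set (Int × Int))) _ =>
      let dragons := PySem.Set.inter
        (PySem.Set.ofList (st.1.flatMap (fun p => pvMoves.map (fun m => (p.1 + m.1, p.2 + m.2)))))
        board
      (dragons, st.2 ++ [dragons])) (ds, acc)
    = ((fun s => pvMoveDragons s board)^[l.length] ds, acc ++ pvTable board ds l.length) := by
  induction l generalizing ds acc with
  | nil => simp [pvTable]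
  | cons x xs ih =>
    simp only [List.foldl_cons, List.length_cons]
    rw [ih]
    simp [pvTable, Function.iterate_succ_apply, pvMoveDragons, pvMoves, pvMoves]

theorem pv_down_inj : Function.Injective pvDown := by
  intro a b h
  cases a; cases b
  simpa [pvDown, Prod.ext_iff] using h

theorem pv_nodup_moveDragons (ds board : PySem.Set (Int × Int)) :
    (pvMoveDragons ds board).Nodup :=
  PySem.Set.nodup_inter _ _ (PySem.Set.nodup_ofList _)


-- per-sheep accounting of one round: split the sum over S by the three tests of pvEat
theorem pv_sum_eat (board hideouts d' : PySem.Set (Int × Int))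
    (tbl : List (PySem.Set (Int × Int))) (S : List (Int × Int)) :
    (S.map (fun s => pvEat board hideouts s (d' :: tbl))).sum
      = ((S.filter (fun x => d'.contains x && !hideouts.contains x)).length : Int)
        + ((((((S.filter (fun x => !(d'.contains x && !hideouts.contains x))).filter
                (fun s => board.contains (pvDown s))).map pvDown).filter
                (fun x => d'.contains x && !hideouts.contains x)).length : Int)
        + (((((S.filter (fun x => !(d'.contains x && !hideouts.contains x))).filter
                (fun s => board.contains (pvDown s))).map pvDown).filter
                (fun x => !(d'.contains x && !hideouts.contains x))).map
              (fun t => pvEat board hideouts t tbl)).sum) := by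
  induction S with
  | nil => simp
  | cons x xs ih =>
    have hE : ∀ pos : Int × Int, pvEat board hideouts pos (d' :: tbl)
        = (if d'.contains pos && !hideouts.contains pos then 1
           else if !board.contains (pvDown pos) then 0
           else if d'.contains (pvDown pos) && !hideouts.contains (pvDown pos) then 1
           else pvEat board hideouts (pvDown pos) tbl) := fun _ => rfl
    simp only [List.map_cons, List.sum_cons, List.filter_cons]
    rw [hE x, ih]
    cases hpx : (d'.contains x && !hideouts.contains x) <;>
      cases hqx : board.contains (pvDown x) <;>
        cases hpx' : (d'.contains (pvDown x) && !hideouts.contains (pvDown x)) <;>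
          simp only [hqx, hpx', Bool.not_true, Bool.not_false, Bool.false_eq_true,
            if_true, if_false, List.filter_cons, List.map_cons,
            List.sum_cons, List.length_cons, hpx] <;> push_cast <;> omega

-- one application of pvStepA, written through filters and pvDown
theorem hstep_eq (board hideouts : PySem.Set (Int × Int))
    (ds S : PySem.Set (Int × Int)) (e : Int) (hS : S.Nodup) :
    pvStepA board hideouts (ds, S, e)
      = (pvMoveDragons ds board,
         ((((S.filter (fun x => !((pvMoveDragons ds board).contains x && !hideouts.contains x))).filter
             (fun s => board.contains (pvDown s))).map pvDown).filter
             (fun x => !((pvMoveDragons ds board).contains x && !hideouts.contains x))),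
         e + ((S.filter (fun x => (pvMoveDragons ds board).contains x && !hideouts.contains x)).length : Int)
           + (((((S.filter (fun x => !((pvMoveDragons ds board).contains x && !hideouts.contains x))).filter
                 (fun s => board.contains (pvDown s))).map pvDown).filter
                 (fun x => (pvMoveDragons ds board).contains x && !hideouts.contains x)).length : Int)) := by
  have hd'n : (pvMoveDragons ds board).Nodup := pv_nodup_moveDragons ds board
  have hdiff : ∀ (T : PySem.Set (Int × Int)),
      PySem.Set.diff T (PySem.Set.diff (pvMoveDragons ds board) hideouts)
        = T.filter (fun x => !((pvMoveDragons ds board).contains x && !hideouts.contains x)) := by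
    intro T
    apply List.filter_congr
    intro x _
    rw [pv_contains_diff]
  have hlen : ∀ (T : PySem.Set (Int × Int)), T.Nodup →
      PySem.Set.len (PySem.Set.inter (pvMoveDragons ds board) (PySem.Set.diff T hideouts))
        = ((T.filter (fun x => (pvMoveDragons ds board).contains x && !hideouts.contains x)).length : Int) := by
    intro T hT
    rw [show PySem.Set.diff T hideouts = T.filter (fun x => !hideouts.contains x) from rfl]
    rw [pv_len_inter _ _ hd'n (hT.filter _), List.filter_filter]
  have hS1n : (S.filter
      (fun x => !((pvMoveDragons ds board).contains x && !hideouts.contains x))).Nodup :=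
    hS.filter _
  have hmv : pvMoveSheep
      (S.filter (fun x => !((pvMoveDragons ds board).contains x && !hideouts.contains x))) board
      = (((S.filter (fun x => !((pvMoveDragons ds board).contains x && !hideouts.contains x))).filter
          (fun s => board.contains (pvDown s))).map pvDown) := by
    unfold pvMoveSheep
    rw [show (S.filter
        (fun x => !((pvMoveDragons ds board).contains x && !hideouts.contains x))).map
          (fun p => (p.1 + 1, p.2))
        = (S.filter
            (fun x => !((pvMoveDragons ds board).contains x && !hideouts.contains x))).map pvDown
      from rfl]
    rw [PySem.Set.ofList_eq_self_of_nodup _ (hS1n.map pv_down_inj)]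
    rw [show ∀ (X : List (Int × Int)), PySem.Set.inter X board
        = X.filter (fun x => board.contains x) from fun _ => rfl]
    rw [List.filter_map]
    rfl
  have hS2n : ((((S.filter
      (fun x => !((pvMoveDragons ds board).contains x && !hideouts.contains x))).filter
      (fun s => board.contains (pvDown s))).map pvDown)).Nodup :=
    (hS1n.filter _).map pv_down_inj
  show (pvMoveDragons ds board, _, _) = _
  simp only [hlen S hS, hmv, hdiff, hlen _ hS2n]

-- the main loop lemma ------------------------------------------------------

theorem pv_main_loop (board hideouts : PySem.Set (Int × Int)) (k : Nat) :
    ∀ (ds S : PySem.Set (Int × Int)) (e : Int), ds.Nodup → S.Nodup →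
      ((pvStepA board hideouts)^[k] (ds, S, e)).2.2
        = e + (S.map (fun s => pvEat board hideouts s (pvTable board ds k))).sum := by
  induction k with
  | zero =>
    intro ds S e _ _
    simp [pvTable, pvEat]
  | succ k ih =>
    intro ds S e hds hS
    have hd'n : (pvMoveDragons ds board).Nodup := pv_nodup_moveDragons ds board
    rw [Function.iterate_succ_apply]
    rw [hstep_eq board hideouts ds S e hS]
    rw [ih _ _ _ hd'n (((hS.filter _).filter _).map pv_down_inj |>.filter _)]
    rw [show pvTable board ds (k + 1)
        = pvMoveDragons ds board :: pvTable board (pvMoveDragons ds board) k from rfl]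
    rw [pv_sum_eat]
    ring

-- parse: the board dict's items are exactly the row-major cell list --------

theorem pv_keys_nodup (s : String) : ((pvCellsA s).map (fun p => p.1)).Nodup := by
  unfold pvCellsA
  rw [List.map_flatMap]
  rw [List.nodup_flatMap]
  constructor
  · intro rl _
    rw [List.map_map]
    show List.Pairwise _ _
    exact ((PySem.List.pairwise_lt_enumerate rl.2.toList 0).map _
      (fun a b h hne => by simp [Prod.ext_iff] at hne; omega))
  · refine (PySem.List.pairwise_lt_enumerate (PySem.Str.splitlines s) 0).imp ?_
    intro p q h a ha hb
    simp only [List.map_map, List.mem_map] at ha hb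
    obtain ⟨c, _, rfl⟩ := ha
    obtain ⟨c', _, h2⟩ := hb
    simp only [Function.comp, Prod.ext_iff] at h2
    omega

theorem pv_items (s : String) :
    ((pvCellsA s).foldl (fun d p => d.insert p.1 p.2) PySem.Dict.empty).items = pvCellsA s := by
  rw [show (fun (d : PySem.Dict (Int × Int) Char) (p : (Int × Int) × Char) => d.insert p.1 p.2)
      = (fun d a => d.insert ((fun p => p.1) a) ((fun p => p.2) a)) from rfl]
  rw [PySem.Dict.items_foldl_insert_fresh _ _ _ _
    (fun a _ => PySem.Dict.contains_empty _) (pv_keys_nodup s)]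
  simp [PySem.Dict.empty]

-- ===== VERDICT (by name: the statement is the Claim_ definition above) =====
theorem part2_spec : Claim_equal_part2 := by
  unfold Claim_equal_part2
  intro s n _ _
  unfold Spec_part2
  simp only [part2, part2_alt]
  rw [show ∀ (d : PySem.Dict (Int × Int) Char), d.keys = d.items.map (fun p => p.1)
    from fun _ => rfl]
  rw [pv_items s]
  have hnk := pv_keys_nodup s
  rw [PySem.Set.ofList_eq_self_of_nodup _ hnk]
  have hsheepn : (((pvCellsA s).filter (fun p => p.2 == 'S')).map (fun p => p.1)).Nodup :=
    hnk.sublist (List.Sublist.map _ List.filter_sublist)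
  rw [PySem.Set.ofList_eq_self_of_nodup _ hsheepn]
  rw [PySem.Set.ofList_eq_self_of_nodup
    (xs := [((((pvCellsA s).find? (fun p => p.2 == 'D')).getD ((0, 0), 'D')).1)])
    (by simp)]
  rw [pv_foldl_const, pv_tableB, PySem.List.foldl_add, List.nil_append]
  rw [pv_main_loop _ _ _ _ _ _ (List.nodup_singleton _) hsheepn]
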